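-- pv_equiv track=rewrite | github.com/Kushal2004/HackerRank | Greedy/Priyanka and Toys.py | toys
-- ===== SOURCE A (Python) =====
-- def toys(w):
--     w.sort()
--     toys = w[0]+4
--     container = 1
--     for i in range(len(w)):
--         if(w[i]>toys):
--             toys=w[i]+4
--             container+=1
--     return container
-- ===== SOURCE B (Python) =====
-- def toys(w):
--     # Sorts w in place like the original; then counts containers by repeated
--     # binary search: each step jumps directly to the first element the current
--     # container cannot hold, instead of testing every element one by one.
--     w.sort()
--     n = len(w)
--     count = 0
--     i = 0
--     while i < n:
--         count += 1
--         limit = w[i] + 4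
--         # binary search for the first index in (i, n) with w[index] > limit
--         lo, hi = i + 1, n
--         while lo < hi:
--             mid = (lo + hi) // 2
--             if w[mid] <= limit:
--                 lo = mid + 1
--             else:
--                 hi = mid
--         i = lo
--     return count
-- ===== Notes on version B (the rewrite author's own statement) =====
-- stated objective: alternative
-- what changed: A scans every element once, comparing each against a running threshold; B counts containers by repeated binary search on the sorted list, jumping from each container's first element directly to the first element beyond its +4 range, so elements inside a container are never inspected individually.
import Mathlib
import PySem

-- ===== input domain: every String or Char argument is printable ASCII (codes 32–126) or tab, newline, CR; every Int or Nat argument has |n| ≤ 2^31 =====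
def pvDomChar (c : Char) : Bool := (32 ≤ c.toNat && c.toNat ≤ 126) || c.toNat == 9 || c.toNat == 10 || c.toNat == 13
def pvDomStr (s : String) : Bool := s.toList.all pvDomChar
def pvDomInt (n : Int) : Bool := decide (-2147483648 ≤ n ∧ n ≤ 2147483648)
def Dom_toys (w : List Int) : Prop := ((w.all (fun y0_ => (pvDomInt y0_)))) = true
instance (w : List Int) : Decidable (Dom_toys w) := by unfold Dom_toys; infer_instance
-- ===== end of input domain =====

-- B replaces A's element-by-element scan with a running threshold by repeated binary
-- search on the sorted list (alternative algorithm, each container found by one bisect).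
-- Note: both A and B sort the argument in place; the equivalence is about the return value.


-- ===== PORT A =====
def toys (w : List Int) : Int :=
  let ws := PySem.List.sorted w (fun x => x) false
  match ws with
  | [] => 0  -- 'w[0]' raises IndexError here; excluded by Pre_toys
  | w0 :: _ =>
    let st := (PySem.List.pyRange 0 (ws.length : Int) 1).foldl
      (fun (st : Int × Int) i =>
        let wi := PySem.List.pyGetD ws i 0
        if wi > st.1 then (wi + 4, st.2 + 1) else st)
      (w0 + 4, 1)
    st.2

-- ===== PORT B =====
-- inner binary search of Source B: first index in [lo, hi) with w[index] > limit (= hi if none);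
-- the 'while lo < hi' loop is ported with a fuel argument hi - lo, which bounds its iterations
def bsBGo (w : List Int) (limit : Int) : Nat → Nat → Nat → Nat
  | 0, lo, _ => lo
  | fuel + 1, lo, hi =>
    if lo < hi then
      let mid := (lo + hi) / 2
      if PySem.List.pyGetD w (mid : Int) 0 ≤ limit then bsBGo w limit fuel (mid + 1) hi
      else bsBGo w limit fuel lo mid
    else lo

def bsB (w : List Int) (limit : Int) (lo hi : Nat) : Nat := bsBGo w limit (hi - lo) lo hi

-- needed by countB's decreasing_by: the search never moves the index backwards
theorem bsB_ge (w : List Int) (limit : Int) (lo hi : Nat) : lo ≤ bsB w limit lo hi := by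
  unfold bsB
  generalize hi - lo = fuel
  induction fuel generalizing lo hi with
  | zero => simp [bsBGo]
  | succ f ih =>
    simp only [bsBGo]
    split
    next hlt =>
      split
      · exact le_trans (by omega) (ih _ _)
      · exact ih lo _
    next => exact le_rfl

-- outer 'while i < n' of Source B
def countB (w : List Int) (n : Nat) (i : Nat) (count : Int) : Int :=
  if i < n then
    countB w n (bsB w (PySem.List.pyGetD w (i : Int) 0 + 4) (i + 1) n) (count + 1)
  else count
  termination_by n - i
  decreasing_by have := bsB_ge w (PySem.List.pyGetD w (i : Int) 0 + 4) (i + 1) n; omega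

def toys_alt (w : List Int) : Int :=
  let ws := PySem.List.sorted w (fun x => x) false
  countB ws ws.length 0 0

-- ===== PRECONDITION & SPEC =====
-- Pre_toys excludes exactly the empty list, on which A raises IndexError at 'w[0]'.
def Pre_toys (w : List Int) : Prop := w ≠ []
instance (w : List Int) : Decidable (Pre_toys w) := by unfold Pre_toys; infer_instance
def pvWitness_toys : List Int := ([1, 7, 2, 6])

def Spec_toys (w : List Int) (out : Int) : Prop := out = toys_alt w
instance (w : List Int) (out : Int) : Decidable (Spec_toys w out) := by unfold Spec_toys; infer_instance

-- ===== CLAIM (what is proved, stated in full; the proofs are below) =====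
def Claim_equal_toys : Prop := ∀ (w : List Int), Dom_toys w → Pre_toys w → Spec_toys w (toys w)

-- ===== LEMMAS AND PROOFS =====

-- group count of a list: open a container at the head, drop what it covers, recurse
def grpB : List Int → Int
  | [] => 0
  | x :: xs => 1 + grpB (xs.dropWhile (fun y => decide (y ≤ x + 4)))
  termination_by xs => xs.length
  decreasing_by simpa using Nat.lt_succ_of_le (List.length_dropWhile_le _ _)

-- A's running-threshold count
def grpA : Int → List Int → Int
  | _, [] => 0
  | t, x :: xs => if x > t then 1 + grpA (x + 4) xs else grpA t xs

-- dropWhile from a is dropWhile from b when everything in [a,b) satisfies the predicate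
theorem dropWhile_drop_congr (w : List Int) (p : Int → Bool) (a b : Nat) (hab : a ≤ b)
    (hb : b ≤ w.length) (h : ∀ j (hj : j < w.length), a ≤ j → j < b → p w[j]) :
    (w.drop a).dropWhile p = (w.drop b).dropWhile p := by
  induction b with
  | zero =>
    have ha : a = 0 := by omega
    rw [ha]
  | succ b ih =>
    rcases Nat.lt_or_ge a (b + 1) with hlt | hge
    · rcases Nat.eq_or_lt_of_le (Nat.le_of_lt_succ hlt) with heq | hlt'
      · subst heq
        have hb' : a < w.length := by omega
        rw [← List.getElem_cons_drop hb', List.dropWhile_cons]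
        simp [h a hb' le_rfl (by omega)]
      · rw [ih (by omega) (by omega) (fun j hj h1 h2 => h j hj h1 (by omega))]
        have hb' : b < w.length := by omega
        rw [← List.getElem_cons_drop hb', List.dropWhile_cons]
        simp [h b hb' (by omega) (by omega)]
    · have : a = b + 1 := by omega
      simp [this]

-- on a region whose elements all exceed the limit, dropWhile drops nothing
theorem dropWhile_gt_eq_self (w : List Int) (limit : Int) (lo : Nat)
    (hup : ∀ j (hj : j < w.length), lo ≤ j → limit < w[j]) :
    (w.drop lo).dropWhile (fun y => decide (y ≤ limit)) = w.drop lo := by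
  rw [List.dropWhile_eq_self_iff]
  intro hne
  have hlt : lo < w.length := by simp [List.length_drop] at hne; omega
  simpa [List.getElem_drop] using (hup lo hlt le_rfl).not_ge

-- binary search characterisation: on a sorted list, drop (bsB …) is the dropWhile tail
theorem drop_bsBGo (w : List Int) (limit : Int) (fuel lo hi : Nat)
    (hs : w.Pairwise (· ≤ ·)) (hlo : lo ≤ hi) (hhi : hi ≤ w.length) (hf : hi - lo ≤ fuel)
    (hup : ∀ j (hj : j < w.length), hi ≤ j → limit < w[j]) :
    w.drop (bsBGo w limit fuel lo hi) = (w.drop lo).dropWhile (fun y => decide (y ≤ limit)) := by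
  induction fuel generalizing lo hi with
  | zero =>
    have heq : lo = hi := by omega
    subst heq
    exact (dropWhile_gt_eq_self w limit lo (fun j hj h1 => hup j hj h1)).symm
  | succ f ih =>
    simp only [bsBGo]
    split
    next hlt =>
      split
      next hle =>
        have hmid : (lo + hi) / 2 < w.length := by omega
        have hget : PySem.List.pyGetD w (((lo + hi) / 2 : Nat) : Int) 0 = w[(lo + hi) / 2] := by
          rw [PySem.List.pyGetD_natCast]
          simp [List.getD_eq_getElem?_getD, hmid]
        rw [ih ((lo + hi) / 2 + 1) hi (by omega) hhi (by omega) hup]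
        refine (dropWhile_drop_congr w _ lo ((lo + hi) / 2 + 1) (by omega) (by omega)
          (fun j hj h1 h2 => ?_)).symm
        have : w[j] ≤ w[(lo + hi) / 2] := by
          rcases Nat.eq_or_lt_of_le (Nat.le_of_lt_succ h2) with heq | hlt'
          · simp [heq]
          · exact List.Pairwise.rel_get_of_lt hs (by simpa using hlt')
        simp only [decide_eq_true_eq]
        exact le_trans this (hget ▸ hle)
      next hgt =>
        have hmid : (lo + hi) / 2 < w.length := by omega
        have hget : PySem.List.pyGetD w (((lo + hi) / 2 : Nat) : Int) 0 = w[(lo + hi) / 2] := by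
          rw [PySem.List.pyGetD_natCast]
          simp [List.getD_eq_getElem?_getD, hmid]
        refine ih lo ((lo + hi) / 2) (by omega) (by omega) (by omega) (fun j hj hj2 => ?_)
        have hmj : w[(lo + hi) / 2] ≤ w[j] := by
          rcases Nat.eq_or_lt_of_le hj2 with heq | hlt'
          · simp [heq]
          · exact List.Pairwise.rel_get_of_lt hs (by simpa using hlt')
        have hm : limit < w[(lo + hi) / 2] := by
          have := hget ▸ hgt; omega
        omega
    next hge =>
      have heq : lo = hi := by omega
      subst heq
      exact (dropWhile_gt_eq_self w limit lo (fun j hj h1 => hup j hj h1)).symm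

theorem drop_bsB (w : List Int) (limit : Int) (lo hi : Nat)
    (hs : w.Pairwise (· ≤ ·)) (hlo : lo ≤ hi) (hhi : hi ≤ w.length)
    (hup : ∀ j (hj : j < w.length), hi ≤ j → limit < w[j]) :
    w.drop (bsB w limit lo hi) = (w.drop lo).dropWhile (fun y => decide (y ≤ limit)) :=
  drop_bsBGo w limit (hi - lo) lo hi hs hlo hhi le_rfl hup

theorem countB_eq (w : List Int) (n : Nat) (i : Nat) (c : Int)
    (hn : n = w.length) (hs : w.Pairwise (· ≤ ·)) :
    countB w n i c = c + grpB (w.drop i) := by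
  fun_induction countB with
  | case1 i c h ih =>
    have hi' : i < w.length := hn ▸ h
    have hget : PySem.List.pyGetD w (i : Int) 0 = w[i] := by
      simp [PySem.List.pyGetD, PySem.List.pyGet?, PySem.List.pyIdx?, hi']
    rw [ih, drop_bsB w _ (i + 1) n hs (by omega) (by omega) (by omega),
      ← List.getElem_cons_drop hi']
    rw [grpB, hget]
    ring
  | case2 i c h =>
    have : w.drop i = [] := List.drop_eq_nil_of_le (by omega)
    simp [this, grpB]

theorem foldA_snd (xs : List Int) (t c : Int) :
    (xs.foldl (fun (st : Int × Int) x => if x > st.1 then (x + 4, st.2 + 1) else st) (t, c)).2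
      = c + grpA t xs := by
  induction xs generalizing t c with
  | nil => simp [grpA, List.foldl_nil]
  | cons x xs ih =>
    by_cases hx : x > t
    · simp only [List.foldl_cons, if_pos hx, grpA, ih]
      ring
    · simp only [List.foldl_cons, if_neg hx, grpA, ih]

theorem grpA_eq_grpB (xs : List Int) (t : Int) :
    grpA t xs = grpB (xs.dropWhile (fun y => decide (y ≤ t))) := by
  induction xs generalizing t with
  | nil => simp [grpA, grpB]
  | cons x xs ih =>
    by_cases hx : x > t
    · have hle : ¬ x ≤ t := not_le.mpr hx
      rw [List.dropWhile_cons]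
      simp only [hle, decide_false, Bool.false_eq_true, if_false]
      rw [grpA, if_pos hx, grpB, ih]
    · have hle : x ≤ t := not_lt.mp hx
      rw [List.dropWhile_cons]
      simp only [hle, decide_true, if_true]
      rw [grpA, if_neg hx, ih]

-- ===== VERDICT (by name: the statement is the Claim_ definition above) =====
theorem toys_spec : Claim_equal_toys := by
  intro w _ hpre
  unfold Spec_toys toys toys_alt
  have hws : PySem.List.sorted w (fun x => x) false ≠ [] := by
    simpa [PySem.List.sorted_eq_nil_iff] using hpre
  have hsorted : (PySem.List.sorted w (fun x => x) false).Pairwise (· ≤ ·) := by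
    simpa using PySem.List.sorted_pairwise w (fun x => x)
  obtain ⟨x, rest, hcons⟩ := List.exists_cons_of_ne_nil hws
  simp only [hcons]
  rw [PySem.List.foldl_pyRange_zero_pyGetD' (x :: rest) 0
        (fun (st : Int × Int) y => if y > st.1 then (y + 4, st.2 + 1) else st) (x + 4, 1)]
  rw [foldA_snd, countB_eq _ _ _ _ rfl (hcons ▸ hsorted)]
  rw [List.drop_zero, grpB]
  have hx : ¬ x > x + 4 := by omega
  rw [grpA, if_neg hx, grpA_eq_grpB]
  ring
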